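-- pv_equiv track=rewrite | github.com/anileren5/METU-CENG | CENG403 - DEEP LEARNING/THE1/cergen.py | calculate_digit_values
-- ===== SOURCE A (Python) =====
-- def calculate_digit_values(shape): # Calculates the digit value (basamak değeri in turkish) of the each digit in counter above mentioned in increment counter. For example, if the shape (4,3,2) the digit values are (6,2,1). As another example, if the shape is (5,4,3,2) then digit values are (24,6,2,1)
--     digit_values = []
--     l = len(shape)
--     for i in range(l):
--         if i == 0:
--             digit_values.append(1)
--         else:
--             digit_values.append(shape[-i] * digit_values[-1])
--     return tuple(digit_values[::-1])
-- ===== SOURCE B (Python) =====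
-- def calculate_digit_values(shape):
--     def prod(xs):
--         p = 1
--         for x in xs:
--             p *= x
--         return p
--     return tuple(prod(shape[i + 1:]) for i in range(len(shape)))
-- ===== Notes on version B (the rewrite author's own statement) =====
-- stated objective: idiomatic
-- what changed: B computes each place value independently as the product of the trailing dimensions shape[i+1:], instead of A's single right-to-left incremental pass that appends running products and reverses at the end.
import Mathlib
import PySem

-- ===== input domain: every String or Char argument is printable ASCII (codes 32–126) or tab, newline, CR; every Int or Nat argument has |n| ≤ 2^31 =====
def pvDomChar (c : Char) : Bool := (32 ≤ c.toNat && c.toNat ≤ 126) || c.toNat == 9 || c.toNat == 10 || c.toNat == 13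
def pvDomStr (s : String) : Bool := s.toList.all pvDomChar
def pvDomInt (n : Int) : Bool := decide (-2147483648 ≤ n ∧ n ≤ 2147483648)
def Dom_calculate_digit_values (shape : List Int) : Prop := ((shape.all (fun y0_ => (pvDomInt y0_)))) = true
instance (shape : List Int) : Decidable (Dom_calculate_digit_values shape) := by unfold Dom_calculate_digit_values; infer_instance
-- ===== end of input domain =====

-- B computes each place value independently as the product of the trailing dimensions
-- shape[i+1:], instead of A's single right-to-left running-product pass (idiomatic alternative).

-- ===== PORT A =====
-- A: builds digit_values left to right (1, then shape[-i] * digit_values[-1]) and reverses.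
-- The defaults of pyGetD are never used: -i and -1 are always in range when those branches run.
def calculate_digit_values (shape : List Int) : List Int :=
  let l : Int := shape.length
  let digit_values :=
    (PySem.List.pyRange 0 l 1).foldl
      (fun dv i =>
        if i = 0 then dv ++ [1]
        else dv ++ [PySem.List.pyGetD shape (-i) 0 * PySem.List.pyGetD dv (-1) 0]) []
  (PySem.List.slice? digit_values none none (-1)).getD []

-- ===== PORT B =====
-- helper prod: p = 1; for x in xs: p *= x
def cdv_prod (xs : List Int) : Int := xs.foldl (· * ·) 1

def calculate_digit_values_alt (shape : List Int) : List Int :=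
  (PySem.List.pyRange 0 (shape.length : Int) 1).map
    (fun i => cdv_prod (PySem.List.slice shape (some (i + 1)) none))

-- ===== PRECONDITION & SPEC =====
def Spec_calculate_digit_values (shape : List Int) (out : List Int) : Prop := out = calculate_digit_values_alt shape
instance (shape : List Int) (out : List Int) : Decidable (Spec_calculate_digit_values shape out) := by unfold Spec_calculate_digit_values; infer_instance

-- ===== CLAIM (what is proved, stated in full; the proofs are below) =====
def Claim_equal_calculate_digit_values : Prop := ∀ (shape : List Int), Dom_calculate_digit_values shape → Spec_calculate_digit_values shape (calculate_digit_values shape)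

-- ===== LEMMAS AND PROOFS =====

theorem cdv_prod_eq_prod (xs : List Int) : cdv_prod xs = xs.prod := by
  rw [cdv_prod, List.prod_eq_foldl]

-- invariant of A's loop: after processing i = 0..k-1, digit_values[i] = prod(shape[len-i:])
theorem cdv_loop_inv (shape : List Int) (k : Nat) (hk : k ≤ shape.length) :
    (PySem.List.pyRange 0 (k : Int) 1).foldl
      (fun dv i =>
        if i = 0 then dv ++ [1]
        else dv ++ [PySem.List.pyGetD shape (-i) 0 * PySem.List.pyGetD dv (-1) 0]) []
    = (List.range k).map (fun i => (shape.drop (shape.length - i)).prod) := by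
  induction k with
  | zero => simp [PySem.List.pyRange_one_eq_nil]
  | succ k ih =>
    have hk' : k ≤ shape.length := Nat.le_of_succ_le hk
    have hcast : ((k + 1 : Nat) : Int) = (k : Int) + 1 := by push_cast; ring
    rw [hcast, PySem.List.pyRange_one_succ_right (by positivity), List.foldl_append,
        ih hk', List.range_succ, List.map_append]
    by_cases hk0 : k = 0
    · subst hk0; simp [List.drop_length]
    · have hkpos : 0 < k := Nat.pos_of_ne_zero hk0
      have hne : ((k : Int)) ≠ 0 := by exact_mod_cast hk0
      simp only [List.foldl_cons, List.foldl_nil, if_neg hne]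
      congr 1
      -- last element of dv is prod(shape[len-(k-1):])
      obtain ⟨m, rfl⟩ : ∃ m, k = m + 1 := ⟨k - 1, by omega⟩
      rw [List.range_succ, List.map_append]
      simp only [List.map_singleton]
      rw [PySem.List.pyGetD_neg_one_append_singleton]
      rw [PySem.List.pyGetD_neg_natCast shape (m+1) 0 hkpos (by exact_mod_cast hk')]
      have hlt : shape.length - (m + 1) < shape.length := by omega
      have hdrop : shape.drop (shape.length - (m + 1))
          = shape[shape.length - (m + 1)] :: shape.drop (shape.length - (m + 1) + 1) := by
        exact List.drop_eq_getElem_cons hlt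
      have hidx : shape.length - (m + 1) + 1 = shape.length - m := by omega
      simp [hdrop, hidx, List.prod_cons]

theorem cdv_alt_eq (shape : List Int) :
    calculate_digit_values_alt shape
    = (List.range shape.length).map (fun j => (shape.drop (j + 1)).prod) := by
  unfold calculate_digit_values_alt
  rw [PySem.List.pyRange_one]
  simp only [sub_zero, Int.toNat_natCast, List.map_map]
  apply List.map_congr_left
  intro k _
  have : (0 : Int) + (k : Int) + 1 = ((k + 1 : Nat) : Int) := by push_cast; ring
  simp only [Function.comp, this, PySem.List.slice_from_natCast, cdv_prod_eq_prod]

-- ===== VERDICT (by name: the statement is the Claim_ definition above) =====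
theorem calculate_digit_values_spec : Claim_equal_calculate_digit_values := by
  intro shape _
  unfold Spec_calculate_digit_values calculate_digit_values
  simp only
  rw [cdv_loop_inv shape shape.length le_rfl, PySem.List.slice?_none_none_neg_one,
      Option.getD_some, cdv_alt_eq]
  apply List.ext_getElem
  · simp
  · intro j h1 h2
    simp only [List.length_map, List.length_range] at h1 h2 ⊢
    rw [List.getElem_reverse]
    simp only [List.getElem_map, List.getElem_range, List.length_map, List.length_range]
    congr 2
    omega
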